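-- pv_equiv track=rewrite | github.com/ZckFreedom/Mathworks | db_sqence/其他论文中用到的/new_way_PSR.py | shift_order_psr
-- ===== SOURCE A (Python) =====
-- def Psr_list(s_sequence):
-- 	size = len(s_sequence)
-- 	sums = 0
--
-- 	for i in range(1, size):
-- 		sums = (sums + s_sequence[i]) % 2
-- 	return sums
--
-- def find_nk(s_sequence):
-- 	size = len(s_sequence)
-- 	state = s_sequence[:]
-- 	state += state
-- 	states = []
--
-- 	for i in range(0, size):
-- 		if state[i: i + size] not in states:
-- 			states.append(state[i: i + size])
--
-- 	states.sort()
-- 	return states[0]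
--
-- def shift_order_psr(s_sequence):
-- 	size = len(s_sequence)
-- 	nk = find_nk(s_sequence + [(Psr_list(s_sequence) + s_sequence[0]) % 2])
-- 	nk += nk
--
-- 	left_shift = Shift_order_space()
--
-- 	for i in range(0, size):
-- 		if left_shift.check(nk[i:i + size]):
-- 			left_shift.append(nk[i:i + size])
--
-- 	return left_shift.get_number(s_sequence), left_shift.get_len()
--
-- class Shift_order_space:
-- 	def __init__(self):
-- 		self._shiftlist = []
-- 		self._shiftnumber = 0
--
-- 	def get_number(self, a_list):
-- 		for i in range(0, len(self._shiftlist)):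
-- 			if a_list == self._shiftlist[i][0]:
-- 				return self._shiftlist[i][1]
-- 		return -1
--
-- 	def get_len(self):
-- 		return self._shiftnumber
--
-- 	def append(self, a_list):
-- 		self._shiftnumber += 1
-- 		self._shiftlist.append((a_list, self._shiftnumber))
--
-- 	def if_not_in(self, a_list):
-- 		if len(self._shiftlist) == 0:
-- 			return True
-- 		for i in range(0, len(self._shiftlist)):
-- 			if self._shiftlist[i][0] == a_list:
-- 				return False
-- 		return True
--
-- 	def check(self, a_list):
-- 		if self.if_not_in(a_list) is not True:
-- 			return False
-- 		return a_list[0] == 1 and Psr_list(a_list) == 0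
-- ===== SOURCE B (Python) =====
-- def shift_order_psr(s_sequence):
--     n = len(s_sequence)
--     ext = s_sequence + [sum(s_sequence) % 2]
--     m = n + 1
--     k = min(range(m), key=lambda i: ext[i:] + ext[:i])
--     nk = ext[k:] + ext[:k]
--     p = next(d for d in range(1, m + 1) if nk[d:] + nk[:d] == nk)
--     total = sum(nk)
--     valid = [i for i in range(min(n, p))
--              if nk[i] == 1 and (total - nk[i] - nk[i - 1]) % 2 == 0]
--     j = (m - k) % m % p
--     return (valid.index(j) + 1 if j in valid else -1, len(valid))
-- ===== Notes on version B (the rewrite author's own statement) =====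
-- stated objective: faster
-- what changed: B drops A's build-all-rotations/dedup/sort search and its window-store class entirely: it takes the argmin rotation start, computes the cyclic period of the least rotation so duplicate windows disappear by index arithmetic (windows repeat exactly with the period), tests each candidate's parity in O(1) from one precomputed total sum, and locates the input's own window by the modular index (m-k)%m instead of scanning stored windows.
-- outside the precondition, e.g. on shift_order_psr([]): A raises IndexError, B returns (-1, 0)
import Mathlib
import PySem

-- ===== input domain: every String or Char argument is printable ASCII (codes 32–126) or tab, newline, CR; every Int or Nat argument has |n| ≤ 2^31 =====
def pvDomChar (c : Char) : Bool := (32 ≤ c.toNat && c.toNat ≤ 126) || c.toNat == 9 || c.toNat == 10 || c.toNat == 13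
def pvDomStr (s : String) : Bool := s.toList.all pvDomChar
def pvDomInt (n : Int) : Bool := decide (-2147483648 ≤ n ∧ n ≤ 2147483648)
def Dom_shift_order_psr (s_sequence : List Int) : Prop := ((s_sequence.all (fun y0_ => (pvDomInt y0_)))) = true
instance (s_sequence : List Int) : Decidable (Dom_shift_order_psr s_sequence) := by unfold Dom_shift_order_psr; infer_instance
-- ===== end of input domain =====

-- B replaces A's build-all-rotations/dedup/sort least-rotation search and its window-store class by
-- index arithmetic: argmin rotation start, the cyclic period for dedup, one total sum for the parity
-- tests, and a modular index for the lookup (measured faster); on the empty list A raises IndexError,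
-- which Pre_ excludes.

-- ===== PORT A =====
def Psr_list (s_sequence : List Int) : Int :=
  (PySem.List.pyRange 1 (PySem.List.len s_sequence)).foldl
    (fun sums i => PySem.Int.mod (sums + PySem.List.pyGetD s_sequence i 0) 2) 0

def find_nk (s_sequence : List Int) : List Int :=
  let size : Int := PySem.List.len s_sequence
  let state := s_sequence ++ s_sequence
  let states := (PySem.List.pyRange 0 size).foldl
    (fun states i =>
      let w := PySem.List.slice state (some i) (some (i + size))
      if w ∈ states then states else states ++ [w]) []
  -- Python sorts states and returns its first element; states is nonempty whenever the argument is
  PySem.List.pyGetD (PySem.List.sorted states (fun x => x) false) 0 []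

def sos_get_number : List (List Int × Int) → List Int → Int
  | [], _ => -1
  | p :: rest, a => if a = p.1 then p.2 else sos_get_number rest a

def sos_if_not_in (l : List (List Int × Int)) (a : List Int) : Bool :=
  if l.length = 0 then true else l.all (fun p => !(p.1 == a))

def sos_check (l : List (List Int × Int)) (a : List Int) : Bool :=
  if !(sos_if_not_in l a) then false
  else (PySem.List.pyGetD a 0 0 == 1) && (Psr_list a == 0)

def shift_order_psr (s_sequence : List Int) : Int × Int :=
  let size : Int := PySem.List.len s_sequence
  let nk0 := find_nk (s_sequence ++
    [PySem.Int.mod (Psr_list s_sequence + PySem.List.pyGetD s_sequence 0 0) 2])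
  let nk := nk0 ++ nk0
  let st := (PySem.List.pyRange 0 size).foldl
    (fun (st : List (List Int × Int) × Int) i =>
      let w := PySem.List.slice nk (some i) (some (i + size))
      if sos_check st.1 w then (st.1 ++ [(w, st.2 + 1)], st.2 + 1) else st)
    ([], 0)
  (sos_get_number st.1 s_sequence, st.2)

-- ===== PORT B =====
def shift_order_psr_alt (s_sequence : List Int) : Int × Int :=
  let n : Int := PySem.List.len s_sequence
  let ext := s_sequence ++ [PySem.Int.mod s_sequence.sum 2]
  let m : Int := n + 1
  -- min(range(m), key=rotation): m ≥ 1 on nonempty input, so min exists and the default is never used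
  let k := (PySem.List.min? (PySem.List.pyRange 0 m)
      (fun i => PySem.List.slice ext (some i) none ++ PySem.List.slice ext none (some i))).getD 0
  let nk := PySem.List.slice ext (some k) none ++ PySem.List.slice ext none (some k)
  -- next(d for d in range(1, m+1) if …): d = m always satisfies the test, so the default is never used
  let p := ((PySem.List.pyRange 1 (m + 1)).find?
      (fun d => PySem.List.slice nk (some d) none ++ PySem.List.slice nk none (some d) == nk)).getD m
  let total := nk.sum
  let valid := (PySem.List.pyRange 0 (min n p)).filter
    (fun i => (PySem.List.pyGetD nk i 0 == 1) &&
      (PySem.Int.mod (total - PySem.List.pyGetD nk i 0 - PySem.List.pyGetD nk (i - 1) 0) 2 == 0))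
  let j := PySem.Int.mod (PySem.Int.mod (m - k) m) p
  (if j ∈ valid then (((PySem.List.index? valid j).getD 0 : Nat) : Int) + 1 else -1,
   PySem.List.len valid)

-- ===== PRECONDITION & SPEC =====
-- Python A indexes the first element of s_sequence, an IndexError on the empty list, which Pre_ excludes.
def Pre_shift_order_psr (s_sequence : List Int) : Prop := s_sequence ≠ []
instance (s_sequence : List Int) : Decidable (Pre_shift_order_psr s_sequence) := by
  unfold Pre_shift_order_psr; infer_instance
def pvWitness_shift_order_psr : List Int := [1, 0, 1]

def Spec_shift_order_psr (s_sequence : List Int) (out : Int × Int) : Prop := out = shift_order_psr_alt s_sequence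
instance (s_sequence : List Int) (out : Int × Int) : Decidable (Spec_shift_order_psr s_sequence out) := by unfold Spec_shift_order_psr; infer_instance

-- ===== CLAIM (what is proved, stated in full; the proofs are below) =====
def Claim_equal_shift_order_psr : Prop := ∀ (s_sequence : List Int), Dom_shift_order_psr s_sequence → Pre_shift_order_psr s_sequence → Spec_shift_order_psr s_sequence (shift_order_psr s_sequence)

-- ===== LEMMAS AND PROOFS =====

-- ---------- arithmetic on parities ----------
lemma modmod (a x : Int) : PySem.Int.mod (PySem.Int.mod a 2 + x) 2 = PySem.Int.mod (a + x) 2 := by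
  rw [PySem.Int.mod_eq_emod_of_pos (a := a) (by norm_num)]
  rw [PySem.Int.mod_eq_emod_of_pos (by norm_num), PySem.Int.mod_eq_emod_of_pos (by norm_num)]
  omega

lemma foldl_modsum (l : List Int) : ∀ a : Int,
    l.foldl (fun acc x => PySem.Int.mod (acc + x) 2) (PySem.Int.mod a 2)
      = PySem.Int.mod (a + l.sum) 2 := by
  induction l with
  | nil => intro a; simp
  | cons x l ih =>
    intro a
    simp only [List.foldl_cons, List.sum_cons, modmod]
    rw [ih (a + x)]
    ring_nf

lemma Psr_eq (s : List Int) : Psr_list s = PySem.Int.mod ((s.drop 1).sum) 2 := by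
  have h := PySem.List.foldl_pyRange_pyGetD s 0
    (fun acc x => PySem.Int.mod (acc + x) 2) 0 (a := 1) (by norm_num)
  unfold Psr_list
  rw [h]
  have := foldl_modsum (s.drop 1) 0
  simpa using this

lemma ext_bit_eq (s : List Int) (hs : s ≠ []) :
    PySem.Int.mod (Psr_list s + PySem.List.pyGetD s 0 0) 2 = PySem.Int.mod s.sum 2 := by
  obtain ⟨h, t, rfl⟩ := List.exists_cons_of_ne_nil hs
  rw [Psr_eq, PySem.List.pyGetD_zero_cons]
  simp only [List.drop_one, List.tail_cons, List.sum_cons, modmod]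
  ring_nf

-- ---------- rotations ----------
def rotFn (l : List Int) (i : Nat) : List Int := l.drop i ++ l.take i

def rotList (l : List Int) : List (List Int) :=
  (List.range l.length).map (rotFn l)

lemma rot_window (l : List Int) (i : Nat) (hi : i ≤ l.length) :
    ((l ++ l).drop i).take l.length = rotFn l i := by
  rw [rotFn, List.drop_append_of_le_length hi, List.take_append]
  have h1 : (l.drop i).length = l.length - i := by simp
  rw [List.take_of_length_le (by omega), h1, Nat.sub_sub_self hi]

lemma rot_eq_rotate (l : List Int) (d : Nat) (hd : d ≤ l.length) :
    rotFn l d = l.rotate d := by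
  rw [List.rotate_eq_drop_append_take hd, rotFn]

lemma getD_eq_get (l : List Int) (i : Nat) (h : i < l.length) : l.getD i 0 = l[i] := by
  rw [List.getD_eq_getElem?_getD, List.getElem?_eq_getElem h, Option.getD_some]



-- first minimum of sorted distinct elements
lemma sortedHead_min {κ : Type} [LinearOrder κ] [BEq κ] [LawfulBEq κ]
    (R : List κ) (hR : R ≠ []) (dflt : κ) :
    PySem.List.pyGetD (PySem.List.sorted (PySem.Set.ofList R) (fun x => x) false) 0 dflt
      = (PySem.List.min? R (fun x => x)).getD dflt := by
  obtain ⟨mn, hmn⟩ : ∃ mn, PySem.List.min? R (fun x : κ => x) = some mn := by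
    cases h : PySem.List.min? R (fun x : κ => x) with
    | none => exact absurd ((PySem.List.min?_eq_none_iff R _).mp h) hR
    | some mn => exact ⟨mn, rfl⟩
  rw [hmn, PySem.List.pyGetD_zero]
  have hmnR : mn ∈ R := PySem.List.min?_mem hmn
  have hpair := PySem.List.sorted_pairwise (PySem.Set.ofList R) (fun x : κ => x)
  have hperm := PySem.List.sorted_perm (PySem.Set.ofList R) (fun x : κ => x) false
  cases hT : PySem.List.sorted (PySem.Set.ofList R) (fun x : κ => x) false with
  | nil =>
    rw [PySem.List.sorted_eq_nil_iff] at hT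
    obtain ⟨r, rs, rfl⟩ := List.exists_cons_of_ne_nil hR
    have : r ∈ PySem.Set.ofList (r :: rs) := (PySem.Set.mem_ofList _ _).mpr List.mem_cons_self
    rw [hT] at this
    exact absurd this (List.not_mem_nil)
  | cons t ts =>
    rw [hT] at hpair hperm
    simp only [List.getD_cons_zero, Option.getD_some]
    have hmem : ∀ x, x ∈ t :: ts ↔ x ∈ R := by
      intro x
      rw [hperm.mem_iff, PySem.Set.mem_ofList]
    apply le_antisymm
    · rcases List.mem_cons.mp ((hmem mn).mpr hmnR) with h | h
      · exact le_of_eq h.symm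
      · exact (List.pairwise_cons.mp hpair).1 mn h
    · exact PySem.List.min?_isMin (key := fun x : κ => x) hmn t
        ((hmem t).mp List.mem_cons_self)

-- A's find_nk computes the minimum of the rotations
set_option maxHeartbeats 1000000 in
lemma find_nk_eq (l : List Int) (hl : l ≠ []) :
    find_nk l = (PySem.List.min? (rotList l) (fun x => x)).getD [] := by
  unfold find_nk
  simp only [PySem.List.len_eq, PySem.List.pyRange_zero_nat, List.foldl_map]
  have hfold :
      (List.range l.length).foldl
        (fun states i =>
          let w := PySem.List.slice (l ++ l) (some ((i : Nat) : Int)) (some (((i : Nat) : Int) + (l.length : Int)))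
          if w ∈ states then states else states ++ [w]) []
      = PySem.Set.ofList (rotList l) := by
    rw [PySem.List.foldl_congr_mem _ _ (fun s i => PySem.Set.add s (rotFn l i)) _ ?_]
    · rw [rotList, ← List.foldl_map, ← PySem.Set.ofList_eq_foldl]
    · intro acc i hi
      have hi' : i < l.length := List.mem_range.mp hi
      have hw : PySem.List.slice (l ++ l) (some ((i : Nat) : Int)) (some (((i : Nat) : Int) + (l.length : Int)))
          = rotFn l i := by
        rw [PySem.List.slice_natCast_add, rot_window l i (le_of_lt hi')]
      simp only [hw, PySem.Set.add_eq_ite]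
  rw [hfold]
  rw [show (fun (a b : List Int) => a.decidableLT b)
        = @LinearOrder.toDecidableLT _ List.instLinearOrder from Subsingleton.elim _ _]
  apply sortedHead_min
  have hlen : (rotList l).length = l.length := by simp [rotList]
  intro h
  rw [h] at hlen
  simp at hlen
  exact hl (List.eq_nil_of_length_eq_zero hlen.symm)

-- ---------- min? plumbing ----------
lemma min?_map_aux {α β κ : Type} [LT κ] [DecidableLT κ] (f : α → β) (key : β → κ) (xs : List α) :
    ∀ acc : Option α,
    (xs.map f).foldl
      (fun acc x => match acc with
        | none => some x
        | some m => if key x < key m then some x else some m) (acc.map f)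
    = (xs.foldl
        (fun acc x => match acc with
          | none => some x
          | some m => if key (f x) < key (f m) then some x else some m) acc).map f := by
  induction xs with
  | nil => intro acc; rfl
  | cons x xs ih =>
    intro acc
    rw [List.map_cons, List.foldl_cons, List.foldl_cons]
    cases acc with
    | none => exact ih (some x)
    | some m =>
      simp only [Option.map_some]
      by_cases hlt : key (f x) < key (f m)
      · rw [if_pos hlt, if_pos hlt]; exact ih (some x)
      · rw [if_neg hlt, if_neg hlt]; exact ih (some m)

lemma min?_map {α β κ : Type} [LT κ] [DecidableLT κ] (f : α → β) (key : β → κ) (xs : List α) :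
    PySem.List.min? (xs.map f) key = (PySem.List.min? xs (fun a => key (f a))).map f := by
  have h := min?_map_aux f key xs none
  simpa [PySem.List.min?] using h

lemma min?_congr_aux {α κ : Type} [LT κ] [DecidableLT κ] :
    ∀ (xs : List α) (k1 k2 : α → κ), (∀ x ∈ xs, k1 x = k2 x) →
    ∀ acc : Option α, (∀ y, acc = some y → k1 y = k2 y) →
    xs.foldl
      (fun acc x => match acc with
        | none => some x
        | some m => if k1 x < k1 m then some x else some m) acc
    = xs.foldl
        (fun acc x => match acc with
          | none => some x
          | some m => if k2 x < k2 m then some x else some m) acc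
  | [], _, _, _, _, _ => rfl
  | x :: xs, k1, k2, h, acc, hacc => by
    rw [List.foldl_cons, List.foldl_cons]
    have hx : k1 x = k2 x := h x List.mem_cons_self
    have h' : ∀ y ∈ xs, k1 y = k2 y := fun y hy => h y (List.mem_cons_of_mem _ hy)
    cases acc with
    | none =>
      exact min?_congr_aux xs k1 k2 h' (some x) (fun y hy => by cases hy; exact hx)
    | some m =>
      have hm : k1 m = k2 m := hacc m rfl
      show List.foldl _ (if k1 x < k1 m then some x else some m) xs
         = List.foldl _ (if k2 x < k2 m then some x else some m) xs
      rw [hx, hm]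
      exact min?_congr_aux xs k1 k2 h' (if k2 x < k2 m then some x else some m)
        (fun y hy => by
          by_cases hc : k2 x < k2 m
          · rw [if_pos hc] at hy; cases hy; exact hx
          · rw [if_neg hc] at hy; cases hy; exact hm)

lemma min?_congr {α κ : Type} [LT κ] [DecidableLT κ] (xs : List α) (k1 k2 : α → κ)
    (h : ∀ x ∈ xs, k1 x = k2 x) :
    PySem.List.min? xs k1 = PySem.List.min? xs k2 := by
  unfold PySem.List.min?
  exact min?_congr_aux xs k1 k2 h none (fun y hy => by cases hy)

-- B's argmin k: its value and the rotation it selects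
lemma bk_spec (l : List Int) (hl : l ≠ []) :
    ∃ k₀ : Nat, k₀ < l.length ∧
      (PySem.List.min? (PySem.List.pyRange 0 (PySem.List.len l))
        (fun i => PySem.List.slice l (some i) none ++ PySem.List.slice l none (some i))).getD 0
        = (k₀ : Int) ∧
      (PySem.List.min? (rotList l) (fun x => x)).getD [] = rotFn l k₀ := by
  have hl0 : 0 < l.length := List.length_pos_iff.mpr hl
  have h1 : PySem.List.pyRange 0 (PySem.List.len l) = (List.range l.length).map (fun k : Nat => (k : Int)) := by
    rw [PySem.List.len_eq, PySem.List.pyRange_zero_nat]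
  have h2 : PySem.List.min? ((List.range l.length).map (fun k : Nat => (k : Int)))
      (fun i => PySem.List.slice l (some i) none ++ PySem.List.slice l none (some i))
      = (PySem.List.min? (List.range l.length) (rotFn l)).map (fun k : Nat => (k : Int)) := by
    rw [min?_map (fun k : Nat => (k : Int))
      (fun i => PySem.List.slice l (some i) none ++ PySem.List.slice l none (some i))
      (List.range l.length)]
    congr 1
    apply min?_congr
    intro x _
    rw [PySem.List.slice_from_natCast, PySem.List.slice_to_natCast, rotFn]
  obtain ⟨k₀, hk₀⟩ : ∃ k₀, PySem.List.min? (List.range l.length) (rotFn l) = some k₀ := by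
    cases h : PySem.List.min? (List.range l.length) (rotFn l) with
    | none =>
      have := (PySem.List.min?_eq_none_iff _ _).mp h
      rw [List.range_eq_nil] at this
      omega
    | some k₀ => exact ⟨k₀, rfl⟩
  have hk₀mem : k₀ < l.length := List.mem_range.mp (PySem.List.min?_mem hk₀)
  refine ⟨k₀, hk₀mem, ?_, ?_⟩
  · rw [h1, h2, hk₀]; rfl
  · rw [rotList, min?_map (rotFn l) (fun x => x) (List.range l.length)]
    rw [show (fun a => (fun x : List Int => x) (rotFn l a)) = rotFn l from rfl]
    rw [hk₀]; rfl

-- ---------- the cyclic period ----------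
lemma period_ex (nk : List Int) : ∃ d, 0 < d ∧ nk.rotate d = nk := by
  refine ⟨max 1 nk.length, by omega, ?_⟩
  rcases eq_or_ne nk [] with rfl | h
  · simp
  · have : max 1 nk.length = nk.length := by
      have := List.length_pos_iff.mpr h
      omega
    rw [this, List.rotate_length]

def periodOf (nk : List Int) : Nat := Nat.find (period_ex nk)

lemma period_pos (nk : List Int) : 0 < periodOf nk := (Nat.find_spec (period_ex nk)).1

lemma period_rot (nk : List Int) : nk.rotate (periodOf nk) = nk := (Nat.find_spec (period_ex nk)).2

lemma period_min (nk : List Int) (d : Nat) (h1 : 0 < d) (h2 : d < periodOf nk) :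
    nk.rotate d ≠ nk := by
  intro h
  exact (Nat.find_min (period_ex nk) h2) ⟨h1, h⟩

lemma rotate_mul (nk : List Int) (q : Nat) : nk.rotate (periodOf nk * q) = nk := by
  induction q with
  | zero => simp
  | succ q ih =>
    have : periodOf nk * (q + 1) = periodOf nk * q + periodOf nk := by ring
    rw [this, ← List.rotate_rotate, ih, period_rot]

lemma period_dvd (nk : List Int) (d : Nat) (h : nk.rotate d = nk) : periodOf nk ∣ d := by
  rcases Nat.eq_zero_or_pos d with rfl | hd
  · exact Dvd.intro 0 rfl
  have hr : nk.rotate (d % periodOf nk) = nk := by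
    have hd' : periodOf nk * (d / periodOf nk) + d % periodOf nk = d := by
      have := Nat.div_add_mod d (periodOf nk); omega
    calc nk.rotate (d % periodOf nk)
        = (nk.rotate (periodOf nk * (d / periodOf nk))).rotate (d % periodOf nk) := by
          rw [rotate_mul]
      _ = nk.rotate (periodOf nk * (d / periodOf nk) + d % periodOf nk) := List.rotate_rotate _ _ _
      _ = nk := by rw [hd', h]
  by_contra hnd
  have h1 : 0 < d % periodOf nk := by
    rcases Nat.eq_zero_or_pos (d % periodOf nk) with h0 | h0
    · exact absurd (Nat.dvd_of_mod_eq_zero h0) hnd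
    · exact h0
  exact period_min nk _ h1 (Nat.mod_lt _ (period_pos nk)) hr

lemma period_dvd_length (nk : List Int) (h : nk ≠ []) : periodOf nk ∣ nk.length :=
  period_dvd nk _ (List.rotate_length nk)

-- ---------- the cyclic value function g ----------
def gfun (nk : List Int) (u : Nat) : Int := nk.getD (u % nk.length) 0

lemma g_congr (nk : List Int) (u v : Nat) (h : u % nk.length = v % nk.length) :
    gfun nk u = gfun nk v := by
  unfold gfun; rw [h]

lemma g_add_len (nk : List Int) (u : Nat) (h : nk ≠ []) : gfun nk (u + nk.length) = gfun nk u := by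
  apply g_congr; simp [Nat.add_mod_right]

lemma getElem_idx_congr (l : List Int) (a b : Nat) (h : a = b) (ha : a < l.length) :
    l[a]'ha = l[b]'(h ▸ ha) := by
  subst h; rfl

lemma get_eq_gfun (nk : List Int) (t : Nat) (h : t < nk.length) :
    nk[t] = gfun nk t := by
  unfold gfun
  rw [Nat.mod_eq_of_lt h, getD_eq_get _ _ h]

lemma g_rotate_getElem (nk : List Int) (d t : Nat) (h : nk ≠ []) :
    gfun (nk.rotate d) t = gfun nk (t + d) := by
  have hm : 0 < nk.length := List.length_pos_iff.mpr h
  have hlen : (nk.rotate d).length = nk.length := List.length_rotate nk d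
  have ht : t % nk.length < (nk.rotate d).length := by rw [hlen]; exact Nat.mod_lt _ hm
  unfold gfun
  rw [hlen, getD_eq_get _ _ ht, List.getElem_rotate]
  have e : (t % nk.length + d) % nk.length = (t + d) % nk.length := Nat.mod_add_mod t nk.length d
  rw [getD_eq_get _ _ (Nat.mod_lt _ hm)]
  exact getElem_idx_congr nk _ _ e _

lemma g_period (nk : List Int) (h : nk ≠ []) (u : Nat) :
    gfun nk (u + periodOf nk) = gfun nk u := by
  conv_rhs => rw [← period_rot nk]
  rw [g_rotate_getElem nk _ u h]

lemma g_period_mul (nk : List Int) (h : nk ≠ []) (u q : Nat) :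
    gfun nk (u + periodOf nk * q) = gfun nk u := by
  induction q with
  | zero => simp
  | succ q ih =>
    have : u + periodOf nk * (q + 1) = (u + periodOf nk * q) + periodOf nk := by ring
    rw [this, g_period nk h, ih]

lemma g_mod_p (nk : List Int) (h : nk ≠ []) (u : Nat) :
    gfun nk u = gfun nk (u % periodOf nk) := by
  conv_lhs => rw [show u = u % periodOf nk + periodOf nk * (u / periodOf nk) by
    have := Nat.div_add_mod u (periodOf nk); omega]
  rw [g_period_mul nk h]

-- ---------- windows ----------
def winf (nk : List Int) (n i : Nat) : List Int :=
  (List.range n).map (fun t => gfun nk (i + t))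

lemma g_addl_mod (nk : List Int) (h : nk ≠ []) (i a : Nat) :
    gfun nk (i + a) = gfun nk (i % periodOf nk + a) := by
  conv_lhs => rw [show i + a = (i % periodOf nk + a) + periodOf nk * (i / periodOf nk) by
    have := Nat.div_add_mod i (periodOf nk); omega]
  rw [g_period_mul nk h]

lemma win_cons (nk : List Int) (n i : Nat) (hn : 0 < n) :
    winf nk n i = gfun nk i :: winf nk (n - 1) (i + 1) := by
  obtain ⟨n', rfl⟩ : ∃ n', n = n' + 1 := ⟨n - 1, by omega⟩
  unfold winf
  rw [List.range_succ_eq_map, List.map_cons, List.map_map]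
  simp only [Nat.add_zero, Nat.add_sub_cancel]
  congr 1
  apply List.map_congr_left
  intro t _
  show gfun nk (i + Nat.succ t) = gfun nk (i + 1 + t)
  exact congrArg (gfun nk) (by omega)

lemma win_getElem? (nk : List Int) (n i t : Nat) (ht : t < n) :
    (winf nk n i)[t]? = some (gfun nk (i + t)) := by
  unfold winf
  rw [List.getElem?_map, List.getElem?_range ht, Option.map_some]

lemma win_slice (nk : List Int) (n c : Nat) (hc : c ≤ nk.length) (hn : n < nk.length) :
    ((nk ++ nk).drop c).take n = winf nk n c := by
  have hm : 0 < nk.length := by omega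
  apply List.ext_getElem
  · simp [winf]; omega
  · intro t h1 h2
    have ht : t < n := by simpa [winf] using h2
    have hct : c + t < nk.length + nk.length := by omega
    rw [List.getElem_take, List.getElem_drop]
    have hrhs : (winf nk n c)[t] = gfun nk (c + t) := by
      have := win_getElem? nk n c t ht
      rw [List.getElem?_eq_getElem h2, Option.some_inj] at this
      exact this
    rw [hrhs]
    unfold gfun
    rw [getD_eq_get _ _ (Nat.mod_lt _ hm), List.getElem_append]
    split
    · next h' =>
      exact getElem_idx_congr nk _ _ (Nat.mod_eq_of_lt h').symm _
    · next h' =>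
      have hmod : (c + t) % nk.length = c + t - nk.length := by
        rw [Nat.mod_eq_sub_mod (by omega), Nat.mod_eq_of_lt (by omega)]
      exact getElem_idx_congr nk _ _ hmod.symm _

lemma win_period (nk : List Int) (h : nk ≠ []) (n i q : Nat) :
    winf nk n (i + periodOf nk * q) = winf nk n i := by
  unfold winf
  apply List.map_congr_left
  intro t _
  have : i + periodOf nk * q + t = (i + t) + periodOf nk * q := by ring
  rw [this, g_period_mul nk h]

lemma win_mod (nk : List Int) (h : nk ≠ []) (n i : Nat) :
    winf nk n i = winf nk n (i % periodOf nk) := by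
  conv_lhs => rw [show i = i % periodOf nk + periodOf nk * (i / periodOf nk) by
    have := Nat.div_add_mod i (periodOf nk); omega]
  rw [win_period nk h]

-- window sums
lemma range_getD (l : List Int) :
    (List.range l.length).map (fun t => l.getD t 0) = l := by
  induction l with
  | nil => simp
  | cons x xs ih =>
    rw [List.length_cons, List.range_succ_eq_map, List.map_cons, List.map_map,
      List.getD_cons_zero]
    exact congrArg (x :: ·)
      ((List.map_congr_left (fun t _ => by simp [List.getD_cons_succ])).trans ih)

lemma gsum_full (nk : List Int) (h : nk ≠ []) (i : Nat) :
    (winf nk nk.length i).sum = nk.sum := by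
  have hm : 0 < nk.length := List.length_pos_iff.mpr h
  induction i with
  | zero =>
    have : winf nk nk.length 0 = (List.range nk.length).map (fun t => nk.getD t 0) := by
      unfold winf
      apply List.map_congr_left
      intro t ht
      unfold gfun
      rw [Nat.zero_add, Nat.mod_eq_of_lt (List.mem_range.mp ht)]
    rw [this, range_getD]
  | succ i ih =>
    have e1 : winf nk nk.length i = gfun nk i :: winf nk (nk.length - 1) (i + 1) :=
      win_cons nk _ i hm
    have e2 : winf nk nk.length (i + 1)
        = winf nk (nk.length - 1) (i + 1) ++ [gfun nk (i + 1 + (nk.length - 1))] := by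
      unfold winf
      conv_lhs => rw [show nk.length = (nk.length - 1) + 1 by omega]
      rw [List.range_succ, List.map_append, List.map_cons, List.map_nil]
    have e3 : gfun nk (i + 1 + (nk.length - 1)) = gfun nk i := by
      rw [show i + 1 + (nk.length - 1) = i + nk.length by omega]
      exact g_add_len nk i h
    rw [e2, e3, List.sum_append, List.sum_cons] at *
    rw [e1, List.sum_cons] at ih
    simp only [List.sum_cons, List.sum_nil] at *
    omega

lemma win_sum (nk : List Int) (h : nk ≠ []) (n i : Nat) (hn : n + 1 = nk.length) :
    (winf nk n i).sum = nk.sum - gfun nk (i + n) := by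
  have e : winf nk nk.length i = winf nk n i ++ [gfun nk (i + n)] := by
    unfold winf
    conv_lhs => rw [show nk.length = n + 1 from hn.symm]
    rw [List.range_succ, List.map_append, List.map_cons, List.map_nil]
  have := gsum_full nk h i
  rw [e, List.sum_append, List.sum_cons, List.sum_nil] at this
  omega

-- ---------- the chain argument: n of the n+1 cyclic agreements imply all of them ----------
lemma chain_lemma (nk : List Int) (h : nk ≠ []) (d u0 : Nat)
    (H : ∀ v, v % nk.length ≠ u0 % nk.length → gfun nk v = gfun nk (v + d)) :
    ∀ v, gfun nk v = gfun nk (v + d) := by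
  have hm : 0 < nk.length := List.length_pos_iff.mpr h
  have ex : ∃ c, 0 < c ∧ (c * d) % nk.length = 0 :=
    ⟨nk.length, hm, by rw [Nat.mul_mod_right]⟩
  have ho_pos : 0 < Nat.find ex := (Nat.find_spec ex).1
  have ho_zero : (Nat.find ex * d) % nk.length = 0 := (Nat.find_spec ex).2
  have key : gfun nk u0 = gfun nk (u0 + d) := by
    by_cases hd0 : d = 0
    · subst hd0; simp
    have aux : ∀ c, c < Nat.find ex → gfun nk (u0 + d) = gfun nk (u0 + (c + 1) * d) := by
      intro c
      induction c with
      | zero => intro _; norm_num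
      | succ c ih =>
        intro hco
        have h1 := ih (by omega)
        have h2 : ((c + 1) * d) % nk.length ≠ 0 := by
          intro h0
          exact Nat.find_min ex (show c + 1 < Nat.find ex by omega) ⟨by omega, h0⟩
        have h3 : (u0 + (c + 1) * d) % nk.length ≠ u0 % nk.length := by
          intro heq
          have hdvd0 := (Nat.modEq_iff_dvd' (Nat.le_add_right u0 ((c + 1) * d))).mp
              (show u0 % nk.length = (u0 + (c + 1) * d) % nk.length from heq.symm)
          have hdvd : nk.length ∣ (c + 1) * d := by
            simpa [Nat.add_sub_cancel_left] using hdvd0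
          obtain ⟨w, hw⟩ := hdvd
          rw [hw, Nat.mul_mod_right] at h2
          exact h2 rfl
        have h4 := H _ h3
        rw [h1, h4]
        congr 1
        ring
    have h5 := aux (Nat.find ex - 1) (by omega)
    rw [show Nat.find ex - 1 + 1 = Nat.find ex by omega] at h5
    have h6 : (u0 + Nat.find ex * d) % nk.length = u0 % nk.length := by
      rw [Nat.add_mod, ho_zero, Nat.add_zero, Nat.mod_mod_of_dvd _ dvd_rfl]
    rw [h5, g_congr nk _ _ h6]
  intro v
  by_cases hv : v % nk.length = u0 % nk.length
  · have e1 : gfun nk v = gfun nk u0 := g_congr _ _ _ hv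
    have e2 : gfun nk (v + d) = gfun nk (u0 + d) := g_congr _ _ _ (by
      rw [Nat.add_mod, hv, ← Nat.add_mod])
    rw [e1, e2, key]
  · exact H v hv

lemma rot_of_g_period (nk : List Int) (h : nk ≠ []) (d : Nat)
    (hg : ∀ v, gfun nk v = gfun nk (v + d)) : nk.rotate d = nk := by
  have hm : 0 < nk.length := List.length_pos_iff.mpr h
  apply List.ext_getElem (by simp)
  intro t h1 h2
  rw [List.getElem_rotate, get_eq_gfun nk t h2]
  have e1 : nk[(t + d) % nk.length]'(Nat.mod_lt _ hm) = gfun nk ((t + d) % nk.length) :=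
    get_eq_gfun nk _ (Nat.mod_lt _ hm)
  rw [e1, ← g_congr nk (t + d) ((t + d) % nk.length) (Nat.mod_mod_of_dvd _ dvd_rfl).symm]
  exact (hg t).symm

-- equal windows only at equal residues mod the period
lemma win_eq_imp_le (nk : List Int) (h : nk ≠ []) (n i j : Nat) (hn : n + 1 = nk.length)
    (hij : i ≤ j) (hj : j ≤ n) (hw : winf nk n i = winf nk n j) :
    periodOf nk ∣ (j - i) := by
  have hm : 0 < nk.length := List.length_pos_iff.mpr h
  set d := j - i with hd
  apply period_dvd
  apply rot_of_g_period nk h d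
  apply chain_lemma nk h d (i + n)
  intro v hv
  set t := (v + nk.length - i % nk.length) % nk.length with htdef
  have ht_lt : t < nk.length := Nat.mod_lt _ hm
  have e : i % nk.length + (v + nk.length - i % nk.length) = v + nk.length := by
    have := Nat.mod_lt i hm
    omega
  have hiv : (i + t) % nk.length = v % nk.length := by
    have c1 : i + t ≡ i % nk.length + t [MOD nk.length] :=
      Nat.ModEq.add_right t (Nat.mod_modEq i nk.length).symm
    have c2 : i % nk.length + t ≡ i % nk.length + (v + nk.length - i % nk.length)
        [MOD nk.length] :=
      Nat.ModEq.add_left _ (Nat.mod_modEq _ nk.length)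
    have c3 : (i + t) % nk.length = (v + nk.length) % nk.length := by
      have := (c1.trans c2)
      rw [e] at this
      exact this
    rw [c3, Nat.add_mod_right]
  have htn : t ≠ n := by
    intro h'
    apply hv
    rw [← hiv, h']
  have ht : t < n := by omega
  have hg : gfun nk (i + t) = gfun nk (j + t) := by
    have h1 := win_getElem? nk n i t ht
    have h2 := win_getElem? nk n j t ht
    rw [hw] at h1
    exact Option.some_inj.mp (h1.symm.trans h2)
  have e1 : gfun nk v = gfun nk (i + t) := g_congr _ _ _ hiv.symm
  have e2 : gfun nk (v + d) = gfun nk (j + t) := by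
    apply g_congr
    have : i + t + d ≡ v + d [MOD nk.length] := Nat.ModEq.add_right d hiv
    have hjt : j + t = i + t + d := by omega
    rw [hjt]
    exact this.symm
  rw [e1, hg, ← e2]

lemma win_eq_imp (nk : List Int) (h : nk ≠ []) (n i j : Nat) (hn : n + 1 = nk.length)
    (hi : i ≤ n) (hj : j ≤ n) (hw : winf nk n i = winf nk n j) :
    i % periodOf nk = j % periodOf nk := by
  rcases le_total i j with hij | hij
  · obtain ⟨e, he⟩ := win_eq_imp_le nk h n i j hn hij hj hw
    rw [show j = i + periodOf nk * e by omega, Nat.add_mul_mod_self_left]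
  · obtain ⟨e, he⟩ := win_eq_imp_le nk h n j i hn hij hi hw.symm
    rw [show i = j + periodOf nk * e by omega, Nat.add_mul_mod_self_left]

-- ---------- validity of a window ----------
def okf (nk : List Int) (i : Nat) : Bool :=
  (gfun nk i == 1) &&
    (PySem.Int.mod (nk.sum - gfun nk i - gfun nk (i + nk.length - 1)) 2 == 0)

lemma ok_mod (nk : List Int) (h : nk ≠ []) (i : Nat) :
    okf nk i = okf nk (i % periodOf nk) := by
  have hm : 0 < nk.length := List.length_pos_iff.mpr h
  have e0 : gfun nk i = gfun nk (i % periodOf nk) := g_mod_p nk h i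
  have e1 : gfun nk (i + nk.length - 1) = gfun nk (i % periodOf nk + nk.length - 1) := by
    rw [show i + nk.length - 1 = i + (nk.length - 1) by omega,
      show i % periodOf nk + nk.length - 1 = i % periodOf nk + (nk.length - 1) by omega]
    exact g_addl_mod nk h i (nk.length - 1)
  unfold okf
  rw [e0, e1]

-- A's check on the window winf nk n c against the stored state
def VIdx (nk : List Int) (c : Nat) : List Nat :=
  (List.range (min c (periodOf nk))).filter (okf nk)

def storedOf (nk : List Int) (n c : Nat) : List (List Int × Int) :=
  ((VIdx nk c).zipIdx 1).map (fun q => (winf nk n q.1, (q.2 : Int)))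

lemma getD_eq_gfun (nk : List Int) (i : Nat) (hi : i < nk.length) :
    nk.getD i 0 = gfun nk i := by
  unfold gfun
  rw [Nat.mod_eq_of_lt hi]

lemma mem_VIdx (nk : List Int) (c i' : Nat) :
    i' ∈ VIdx nk c ↔ i' < min c (periodOf nk) ∧ okf nk i' = true := by
  unfold VIdx
  rw [List.mem_filter, List.mem_range]

lemma sos_if_not_in_eq (l : List (List Int × Int)) (a : List Int) :
    sos_if_not_in l a = !(l.any (fun p => p.1 == a)) := by
  cases l with
  | nil => rfl
  | cons p rest => simp [sos_if_not_in, List.all_eq_not_any_not]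

lemma stored_any (nk : List Int) (n c : Nat) (w : List Int) :
    (storedOf nk n c).any (fun p => p.1 == w)
      = (VIdx nk c).any (fun i' => winf nk n i' == w) := by
  unfold storedOf
  rw [List.any_map]
  conv_rhs => rw [← List.zipIdx_map_fst 1 (VIdx nk c), List.any_map]
  congr 1

lemma check_eval (nk : List Int) (h : nk ≠ []) (n c : Nat) (hn : n + 1 = nk.length) (hc : c < n) :
    sos_check (storedOf nk n c) (winf nk n c)
      = ((!((VIdx nk c).any (fun i' => winf nk n i' == winf nk n c))) && okf nk c) := by
  have hm : 0 < nk.length := by omega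
  have hhead : PySem.List.pyGetD (winf nk n c) 0 0 = gfun nk c := by
    rw [win_cons nk n c (by omega), PySem.List.pyGetD_zero_cons]
  have hpsr : Psr_list (winf nk n c)
      = PySem.Int.mod (nk.sum - gfun nk c - gfun nk (c + nk.length - 1)) 2 := by
    rw [Psr_eq]
    congr 1
    have hsum := win_sum nk h n c hn
    rw [win_cons nk n c (by omega), List.sum_cons] at hsum
    rw [win_cons nk n c (by omega), List.drop_one, List.tail_cons]
    rw [show c + nk.length - 1 = c + n by omega]
    omega
  unfold sos_check
  rw [sos_if_not_in_eq, stored_any nk n c, hhead, hpsr, Bool.not_not, okf]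
  cases (VIdx nk c).any (fun i' => winf nk n i' == winf nk n c) <;> rfl

-- the A loop invariant
lemma loopA (nk : List Int) (h : nk ≠ []) (n : Nat) (hn : n + 1 = nk.length) :
    ∀ c, c ≤ n →
    (List.range c).foldl
      (fun (st : List (List Int × Int) × Int) (i : Nat) =>
        let w := PySem.List.slice (nk ++ nk) (some ((i : Nat) : Int)) (some (((i : Nat) : Int) + (n : Int)))
        if sos_check st.1 w then (st.1 ++ [(w, st.2 + 1)], st.2 + 1) else st)
      ([], 0)
    = (storedOf nk n c, ((VIdx nk c).length : Int)) := by
  intro c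
  induction c with
  | zero =>
    intro _
    simp [storedOf, VIdx]
  | succ c ih =>
    intro hc
    rw [List.range_succ, List.foldl_append, ih (by omega), List.foldl_cons, List.foldl_nil]
    have hm : 0 < nk.length := by omega
    have hcn : c < n := by omega
    have hp := period_pos nk
    have hw : PySem.List.slice (nk ++ nk) (some ((c : Nat) : Int))
        (some (((c : Nat) : Int) + ((n : Nat) : Int))) = winf nk n c := by
      rw [PySem.List.slice_natCast_add]
      exact win_slice nk n c (by omega) (by omega)
    simp only [hw]
    rw [check_eval nk h n c hn hcn]
    by_cases hcp : c < periodOf nk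
    · have hVsucc : VIdx nk (c + 1) = VIdx nk c ++ (if okf nk c = true then [c] else []) := by
        unfold VIdx
        rw [show min (c + 1) (periodOf nk) = c + 1 by omega,
            show min c (periodOf nk) = c by omega,
            List.range_succ, List.filter_append]
        congr 1
        by_cases hok : okf nk c = true <;> simp [hok]
      by_cases hok : okf nk c = true
      · have hnodup : (VIdx nk c).any (fun i' => winf nk n i' == winf nk n c) = false := by
          rw [List.any_eq_false]
          intro i' hi'
          obtain ⟨hi'lt, _⟩ := (mem_VIdx nk c i').mp hi'
          simp only [beq_iff_eq]
          intro heq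
          have hmodeq := win_eq_imp nk h n i' c hn (by omega) (by omega) heq
          rw [Nat.mod_eq_of_lt (by omega), Nat.mod_eq_of_lt (by omega)] at hmodeq
          omega
        have hcond : ((!((VIdx nk c).any (fun i' => winf nk n i' == winf nk n c))) && okf nk c) = true := by
          rw [hnodup, hok]
          rfl
        rw [if_pos hcond]
        refine Prod.ext ?_ ?_
        · show storedOf nk n c ++ [(winf nk n c, ((VIdx nk c).length : Int) + 1)]
            = storedOf nk n (c + 1)
          unfold storedOf
          rw [hVsucc, if_pos hok, List.zipIdx_append, List.map_append]
          congr 1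
          rw [List.zipIdx_cons, List.zipIdx_nil, List.map_cons, List.map_nil]
          congr 2
          push_cast
          ring
        · show ((VIdx nk c).length : Int) + 1 = ((VIdx nk (c + 1)).length : Int)
          rw [hVsucc, if_pos hok, List.length_append]
          push_cast
          simp
      · have hVeq : VIdx nk (c + 1) = VIdx nk c := by
          rw [hVsucc, if_neg hok, List.append_nil]
        have hokc : okf nk c = false := by
          revert hok
          cases okf nk c <;> simp
        have hnot : ¬ (((!((VIdx nk c).any (fun i' => winf nk n i' == winf nk n c))) && okf nk c) = true) := by
          rw [hokc, Bool.and_false]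
          exact Bool.false_ne_true
        rw [if_neg hnot,
          show storedOf nk n (c + 1) = storedOf nk n c from by unfold storedOf; rw [hVeq], hVeq]
    · have hVeq : VIdx nk (c + 1) = VIdx nk c := by
        unfold VIdx
        rw [show min (c + 1) (periodOf nk) = periodOf nk by omega,
            show min c (periodOf nk) = periodOf nk by omega]
      have hfalse : ((!((VIdx nk c).any (fun i' => winf nk n i' == winf nk n c))) && okf nk c) = false := by
        by_cases hok : okf nk (c % periodOf nk) = true
        · have hr0mem : (c % periodOf nk) ∈ VIdx nk c :=
            (mem_VIdx nk c _).mpr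
              ⟨by rw [show min c (periodOf nk) = periodOf nk by omega]; exact Nat.mod_lt _ hp, hok⟩
          have hany : (VIdx nk c).any (fun i' => winf nk n i' == winf nk n c) = true :=
            List.any_eq_true.mpr ⟨_, hr0mem, by
              simp only [beq_iff_eq]
              exact (win_mod nk h n c).symm⟩
          rw [hany]
          rfl
        · have hokc : okf nk c = false := by
            rw [ok_mod nk h c]
            revert hok
            cases okf nk (c % periodOf nk) <;> simp
          rw [hokc, Bool.and_false]
      have hnot : ¬ (((!((VIdx nk c).any (fun i' => winf nk n i' == winf nk n c))) && okf nk c) = true) := by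
        rw [hfalse]
        exact Bool.false_ne_true
      rw [if_neg hnot,
        show storedOf nk n (c + 1) = storedOf nk n c from by unfold storedOf; rw [hVeq], hVeq]

-- A's final lookup
lemma getnum_aux (nk : List Int) (n : Nat) (s : List Int) (r0 : Nat)
    (hr : winf nk n r0 = s) :
    ∀ (L : List Nat) (a : Nat), (∀ i' ∈ L, winf nk n i' = s → i' = r0) →
    sos_get_number ((L.zipIdx a).map (fun q => (winf nk n q.1, (q.2 : Int)))) s
      = (match PySem.List.index? L r0 with
         | some q => ((q + a : Nat) : Int)
         | none => -1)
  | [], a, _ => by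
    simp [sos_get_number, PySem.List.index?_eq_idxOf?]
  | i' :: L', a, huniq => by
    rw [List.zipIdx_cons, List.map_cons]
    show (if s = winf nk n i' then ((a : Nat) : Int)
      else sos_get_number ((L'.zipIdx (a + 1)).map (fun q => (winf nk n q.1, (q.2 : Int)))) s) = _
    by_cases hcase : i' = r0
    · subst hcase
      rw [if_pos hr.symm, PySem.List.index?_cons_self]
      norm_num
    · have hne : s ≠ winf nk n i' := fun he => hcase (huniq i' List.mem_cons_self he.symm)
      rw [if_neg hne,
        getnum_aux nk n s r0 hr L' (a + 1)
          (fun x hx hxx => huniq x (List.mem_cons_of_mem _ hx) hxx),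
        PySem.List.index?_cons_of_ne _ hcase]
      cases hq : PySem.List.index? L' r0 with
      | none => rfl
      | some q =>
        show ((q + (a + 1) : Nat) : Int) = ((q + 1 + a : Nat) : Int)
        congr 1
        omega

lemma getnum_eq (nk : List Int) (n : Nat) (s : List Int) (r0 : Nat)
    (hr : winf nk n r0 = s)
    (huniq : ∀ i' ∈ VIdx nk n, winf nk n i' = s → i' = r0) :
    sos_get_number (storedOf nk n n) s
      = (match PySem.List.index? (VIdx nk n) r0 with
         | some q => ((q + 1 : Nat) : Int)
         | none => -1) := by
  exact getnum_aux nk n s r0 hr (VIdx nk n) 1 huniq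

-- index? through an injective map
lemma index?_map_cast (l : List Nat) (x : Nat) :
    PySem.List.index? (l.map (fun a : Nat => (a : Int))) ((x : Nat) : Int)
      = PySem.List.index? l x := by
  induction l with
  | nil => rfl
  | cons y l ih =>
    rw [List.map_cons]
    by_cases hxy : y = x
    · subst hxy
      rw [PySem.List.index?_cons_self, PySem.List.index?_cons_self]
    · rw [PySem.List.index?_cons_of_ne _ (by exact_mod_cast hxy),
        PySem.List.index?_cons_of_ne _ hxy, ih]

-- B's validity test equals okf
lemma predB_eq_okf (NK : List Int) (hne : NK ≠ []) (i : Nat) (hi : i < NK.length) :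
    ((PySem.List.pyGetD NK ((i : Nat) : Int) 0 == 1) &&
      (PySem.Int.mod (NK.sum - PySem.List.pyGetD NK ((i : Nat) : Int) 0
        - PySem.List.pyGetD NK (((i : Nat) : Int) - 1) 0) 2 == 0))
    = okf NK i := by
  have e1 : PySem.List.pyGetD NK ((i : Nat) : Int) 0 = gfun NK i := by
    rw [PySem.List.pyGetD_natCast]
    exact getD_eq_gfun NK i hi
  have e2 : PySem.List.pyGetD NK (((i : Nat) : Int) - 1) 0 = gfun NK (i + NK.length - 1) := by
    cases i with
    | zero =>
      rw [show (((0 : Nat) : Int) - 1) = -1 by norm_num, PySem.List.pyGetD_neg_one NK 0 hne,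
        List.getLast_eq_getElem hne, get_eq_gfun NK _ (by omega)]
      congr 1
      omega
    | succ i' =>
      rw [show (((i' + 1 : Nat) : Int) - 1) = ((i' : Nat) : Int) by push_cast; ring,
        PySem.List.pyGetD_natCast, getD_eq_gfun NK i' (by omega),
        show i' + 1 + NK.length - 1 = i' + NK.length by omega, g_add_len NK i' hne]
  rw [e1, e2, okf]

-- B's period search
lemma findp_eq (nk : List Int) (h : nk ≠ []) :
    ((PySem.List.pyRange 1 ((nk.length : Int) + 1)).find?
      (fun d => PySem.List.slice nk (some d) none ++ PySem.List.slice nk none (some d) == nk)).getD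
        (nk.length : Int)
      = ((periodOf nk : Nat) : Int) := by
  have hm : 0 < nk.length := List.length_pos_iff.mpr h
  have hple : periodOf nk ≤ nk.length :=
    Nat.le_of_dvd hm (period_dvd_length nk h)
  have hppos := period_pos nk
  have hsplit : PySem.List.pyRange 1 ((nk.length : Int) + 1)
      = PySem.List.pyRange 1 (periodOf nk : Int)
        ++ PySem.List.pyRange (periodOf nk : Int) ((nk.length : Int) + 1) := by
    apply PySem.List.pyRange_one_append
    · exact_mod_cast hppos
    · exact_mod_cast le_trans hple (Nat.le_succ _)
  set pred := (fun d : Int =>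
    PySem.List.slice nk (some d) none ++ PySem.List.slice nk none (some d) == nk) with hpred
  have hpred_eq : ∀ d : Nat, d ≤ nk.length → (pred (d : Int) = (nk.rotate d == nk)) := by
    intro d hd
    rw [hpred]
    simp only [PySem.List.slice_from_natCast, PySem.List.slice_to_natCast]
    rw [show nk.drop d ++ nk.take d = rotFn nk d from rfl, rot_eq_rotate nk d hd]
  have hfirst : (PySem.List.pyRange 1 (periodOf nk : Int)).find? pred = none := by
    rw [List.find?_eq_none]
    intro x hx
    obtain ⟨hx1, hx2⟩ := PySem.List.mem_pyRange_one.mp hx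
    have hx0 : 0 ≤ x := by omega
    obtain ⟨d, rfl⟩ : ∃ d : Nat, x = (d : Int) := ⟨x.toNat, (Int.toNat_of_nonneg hx0).symm⟩
    have hd1 : 0 < d := by exact_mod_cast hx1
    have hd2 : d < periodOf nk := by exact_mod_cast hx2
    rw [hpred_eq d (by omega)]
    simp only [beq_iff_eq]
    exact period_min nk d hd1 hd2
  have hsecond : (PySem.List.pyRange (periodOf nk : Int) ((nk.length : Int) + 1)).find? pred
      = some ((periodOf nk : Nat) : Int) := by
    rw [PySem.List.pyRange_one_cons (by exact_mod_cast Nat.lt_succ_of_le hple)]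
    rw [List.find?_cons_of_pos]
    rw [hpred_eq _ hple]
    simp [period_rot nk]
  rw [hsplit, List.find?_append, hfirst, Option.none_or, hsecond, Option.getD_some]

-- the input is the window of the minimal rotation at index (m-k)%m
lemma win_rot_inv (l : List Int) (h : l ≠ []) (k₀ : Nat) (hk : k₀ < l.length)
    (n : Nat) (hn : n < l.length) :
    winf (rotFn l k₀) n ((l.length - k₀) % l.length) = l.take n := by
  have hm : 0 < l.length := List.length_pos_iff.mpr h
  have hrot : rotFn l k₀ = l.rotate k₀ := rot_eq_rotate l k₀ (le_of_lt hk)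
  apply List.ext_getElem
  · simp [winf]; omega
  · intro t h1 h2
    have ht : t < n := by simpa [winf] using h1
    have hlhs : (winf (rotFn l k₀) n ((l.length - k₀) % l.length))[t]
        = gfun (rotFn l k₀) ((l.length - k₀) % l.length + t) := by
      have := win_getElem? (rotFn l k₀) n ((l.length - k₀) % l.length) t ht
      rw [List.getElem?_eq_getElem h1, Option.some_inj] at this
      exact this
    rw [hlhs, hrot, g_rotate_getElem l k₀ _ h]
    have e : ((l.length - k₀) % l.length + t + k₀) % l.length = t % l.length := by
      have c1 : (l.length - k₀) % l.length + t + k₀ ≡ (l.length - k₀) + t + k₀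
          [MOD l.length] := by
        exact Nat.ModEq.add_right k₀ (Nat.ModEq.add_right t (Nat.mod_modEq _ _))
      have c2 : (l.length - k₀) + t + k₀ = t + l.length := by omega
      have := c1
      rw [c2] at this
      rw [this, Nat.add_mod_right]
    rw [g_congr _ _ _ e]
    unfold gfun
    rw [Nat.mod_eq_of_lt (show t < l.length by omega),
      getD_eq_get _ _ (by omega), List.getElem_take]

-- ===== VERDICT =====
theorem shift_order_psr_spec : Claim_equal_shift_order_psr := by
  intro s _ hpre
  unfold Spec_shift_order_psr shift_order_psr shift_order_psr_alt
  simp only []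
  rw [ext_bit_eq s hpre]
  have hn0 : 0 < s.length := List.length_pos_iff.mpr hpre
  set B : Int := PySem.Int.mod s.sum 2 with hB
  set ext : List Int := s ++ [B] with hext
  have hextne : ext ≠ [] := by simp [hext]
  have hextlen : ext.length = s.length + 1 := by simp [hext]
  obtain ⟨k₀, hk₀lt, hkInt, hminrot⟩ := bk_spec ext hextne
  have hlen1 : PySem.List.len s + 1 = PySem.List.len ext := by
    simp [PySem.List.len_eq, hextlen]
  rw [hlen1, hkInt, find_nk_eq ext hextne, hminrot]
  have hnkB : PySem.List.slice ext (some ((k₀ : Nat) : Int)) none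
      ++ PySem.List.slice ext none (some ((k₀ : Nat) : Int)) = rotFn ext k₀ := by
    rw [PySem.List.slice_from_natCast, PySem.List.slice_to_natCast]
    rfl
  rw [hnkB]
  set NK : List Int := rotFn ext k₀ with hNK
  have hNKlen : NK.length = s.length + 1 := by
    rw [hNK, rotFn]
    simp
    omega
  have hNKne : NK ≠ [] := by
    intro hh
    rw [hh] at hNKlen
    simp at hNKlen
  have hm : 0 < NK.length := by omega
  have hlen2 : PySem.List.len ext = ((NK.length : Nat) : Int) := by
    simp [PySem.List.len_eq, hextlen, hNKlen]
  rw [hlen2, findp_eq NK hNKne]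
  set P : Nat := periodOf NK with hP
  have hppos : 0 < P := period_pos NK
  -- B's valid list
  have hminc : (min (PySem.List.len s) ((P : Nat) : Int)) = ((min s.length P : Nat) : Int) := by
    rw [PySem.List.len_eq, Nat.cast_min]
  rw [hminc, PySem.List.pyRange_zero_nat, List.filter_map]
  have hfilt : (List.range (min s.length P)).filter
      ((fun i : Int => (PySem.List.pyGetD NK i 0 == 1) &&
        (PySem.Int.mod (NK.sum - PySem.List.pyGetD NK i 0 - PySem.List.pyGetD NK (i - 1) 0) 2 == 0))
        ∘ (fun k : Nat => (k : Int)))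
      = VIdx NK s.length := by
    unfold VIdx
    apply List.filter_congr
    intro i hi
    have hilt : i < NK.length := by
      have := List.mem_range.mp hi
      omega
    exact predB_eq_okf NK hNKne i hilt
  rw [hfilt]
  -- A's loop
  rw [show PySem.List.len s = ((s.length : Nat) : Int) from PySem.List.len_eq s]
  rw [PySem.List.pyRange_zero_nat, List.foldl_map]
  rw [loopA NK hNKne s.length (by omega) s.length le_rfl]
  -- B's j
  have hj : PySem.Int.mod (PySem.Int.mod ((NK.length : Int) - ((k₀ : Nat) : Int)) (NK.length : Int))
      ((P : Nat) : Int)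
      = (((((NK.length - k₀) % NK.length) % P : Nat)) : Int) := by
    rw [show ((NK.length : Int) - ((k₀ : Nat) : Int)) = ((NK.length - k₀ : Nat) : Int) from by
      rw [Nat.cast_sub (by omega)]]
    rw [PySem.Int.mod_eq_emod_of_pos (b := (NK.length : Int)) (by exact_mod_cast hm),
      ← Int.natCast_mod]
    rw [PySem.Int.mod_eq_emod_of_pos (b := ((P : Nat) : Int)) (by exact_mod_cast hppos),
      ← Int.natCast_mod]
  rw [hj]
  set J : Nat := (NK.length - k₀) % NK.length with hJ
  set r0 : Nat := J % P with hr0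
  have hJlt : J < NK.length := Nat.mod_lt _ hm
  -- the input is the window at J
  have hswin : winf NK s.length J = s := by
    have hwri := win_rot_inv ext hextne k₀ hk₀lt s.length (by omega)
    rw [← hNK] at hwri
    rw [hJ, show NK.length = ext.length by omega, hwri, hext]
    exact List.take_left
  have hr1 : winf NK s.length r0 = s := by
    rw [hr0, ← win_mod NK hNKne s.length J, hswin]
  -- uniqueness of the matching stored index
  have huniq : ∀ i' ∈ VIdx NK s.length, winf NK s.length i' = s → i' = r0 := by
    intro i' hi' hwi
    obtain ⟨hi'lt, _⟩ := (mem_VIdx NK s.length i').mp hi'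
    have hmodeq := win_eq_imp NK hNKne s.length i' J (by omega) (by omega) (by omega)
      (hwi.trans hswin.symm)
    rw [Nat.mod_eq_of_lt (show i' < P by omega)] at hmodeq
    rw [hmodeq, hr0]
  rw [getnum_eq NK s.length s r0 hr1 huniq]
  -- compare the two lookups
  have hidx : PySem.List.index? ((VIdx NK s.length).map (fun a : Nat => (a : Int)))
      ((r0 : Nat) : Int) = PySem.List.index? (VIdx NK s.length) r0 :=
    index?_map_cast _ _
  have hlenv : PySem.List.len ((VIdx NK s.length).map (fun a : Nat => (a : Int)))
      = ((VIdx NK s.length).length : Int) := by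
    rw [PySem.List.len_eq, List.length_map]
  by_cases hmem : r0 ∈ VIdx NK s.length
  · obtain ⟨q, hq⟩ : ∃ q, PySem.List.index? (VIdx NK s.length) r0 = some q := by
      have hsome := (PySem.List.index?_isSome_iff (VIdx NK s.length) r0).mpr hmem
      cases h' : PySem.List.index? (VIdx NK s.length) r0 with
      | none => rw [h'] at hsome; simp at hsome
      | some q => exact ⟨q, rfl⟩
    have hmemB : ((r0 : Nat) : Int) ∈ (VIdx NK s.length).map (fun a : Nat => (a : Int)) :=
      List.mem_map.mpr ⟨r0, hmem, rfl⟩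
    rw [hq, if_pos hmemB, hidx, hq]
    refine Prod.ext ?_ ?_
    · show ((q + 1 : Nat) : Int) = (((q : Nat) : Int)) + 1
      push_cast
      ring
    · exact hlenv.symm
  · have hnone : PySem.List.index? (VIdx NK s.length) r0 = none :=
      (PySem.List.index?_eq_none_iff _ _).mpr hmem
    have hmemB : ¬ (((r0 : Nat) : Int) ∈ (VIdx NK s.length).map (fun a : Nat => (a : Int))) := by
      intro hh
      obtain ⟨a, ha, hcast⟩ := List.mem_map.mp hh
      have : a = r0 := by exact_mod_cast hcast
      rw [this] at ha
      exact hmem ha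
    rw [hnone, if_neg hmemB]
    exact Prod.ext rfl hlenv.symm
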